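-- pv_equiv track=rewrite | github.com/raulsistemasydesarrollo/KDD-Ingenieria-de-datos | scripts/rebuild_graph_edges_by_proximity.py | apply_business_rules
-- ===== SOURCE A (Python) =====
-- FORBIDDEN_DIRECT_EDGES = {
--     ("BCN", "MUR"),
--     ("ACO", "BIO"),
--     ("VAL", "ALM"),
-- }
--
-- REQUIRED_EDGES = {
--     ("BCN", "VAL"),
--     ("VAL", "MUR"),
--     ("ACO", "GIJ"),
--     ("GIJ", "BIO"),
--     ("MAD", "SEV"),
--     ("MAD", "MAL"),
-- }
--
-- SOUTH_CHAIN = ("CAC", "SEV", "MAL", "ALM", "MUR")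
--
-- def normalize_edge(src: str, dst: str) -> tuple[str, str]:
--     return (src, dst) if src < dst else (dst, src)
--
-- def apply_business_rules(
--     edge_set: set[tuple[str, str]], node_ids: list[str]
-- ) -> set[tuple[str, str]]:
--     nodes = set(node_ids)
--     filtered = set(edge_set)
--
--     # Elimina conexiones directas no permitidas por regla de red.
--     for src, dst in FORBIDDEN_DIRECT_EDGES:
--         pair = normalize_edge(src, dst)
--         filtered.discard(pair)
--
--     # Corredor sur: sin atajos directos entre nodos no consecutivos.
--     south_nodes = [node for node in SOUTH_CHAIN if node in nodes]
--     allowed_south = set()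
--     for i in range(len(south_nodes) - 1):
--         allowed_south.add(normalize_edge(south_nodes[i], south_nodes[i + 1]))
--     for i in range(len(south_nodes)):
--         for j in range(i + 1, len(south_nodes)):
--             pair = normalize_edge(south_nodes[i], south_nodes[j])
--             if pair not in allowed_south:
--                 filtered.discard(pair)
--
--     # Asegura conexiones obligatorias para corredores definidos.
--     for src, dst in REQUIRED_EDGES:
--         if src in nodes and dst in nodes:
--             filtered.add(normalize_edge(src, dst))
--     for pair in allowed_south:
--         filtered.add(pair)
--     return filtered
-- ===== SOURCE B (Python) =====
-- FORBIDDEN_DIRECT_EDGES = {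
--     ("BCN", "MUR"),
--     ("ACO", "BIO"),
--     ("VAL", "ALM"),
-- }
--
-- REQUIRED_EDGES = {
--     ("BCN", "VAL"),
--     ("VAL", "MUR"),
--     ("ACO", "GIJ"),
--     ("GIJ", "BIO"),
--     ("MAD", "SEV"),
--     ("MAD", "MAL"),
-- }
--
-- SOUTH_CHAIN = ("CAC", "SEV", "MAL", "ALM", "MUR")
--
-- def normalize_edge(src: str, dst: str) -> tuple[str, str]:
--     return (src, dst) if src < dst else (dst, src)
--
-- def apply_business_rules(edge_set, node_ids):
--     nodes = set(node_ids)
--     south = [n for n in SOUTH_CHAIN if n in nodes]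
--     south_present = set(south)
--     consec = {normalize_edge(south[i], south[i + 1]) for i in range(len(south) - 1)}
--     # Edges to delete: the normalized forbidden pairs, plus every present edge that is a
--     # normalized non-consecutive link between two present south nodes (scan the edges
--     # instead of generating every south pair).
--     removable = {normalize_edge(src, dst) for src, dst in FORBIDDEN_DIRECT_EDGES}
--     removable |= {
--         e for e in edge_set
--         if e[0] in south_present and e[1] in south_present
--         and e[0] < e[1] and e not in consec
--     }
--     required = {
--         normalize_edge(src, dst)
--         for src, dst in REQUIRED_EDGES
--         if src in nodes and dst in nodes
--     }
--     return (set(edge_set) - removable) | required | consec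
-- ===== Notes on version B (the rewrite author's own statement) =====
-- stated objective: simpler
-- what changed: A mutates one working set with discard/add loops and generates every O(k^2) south pair to delete; B scans the edge list once to collect a removable set (forbidden pairs plus normalized non-consecutive south links actually present) and returns a single set-algebra expression (edge_set - removable) | required | consec.
import Mathlib
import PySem

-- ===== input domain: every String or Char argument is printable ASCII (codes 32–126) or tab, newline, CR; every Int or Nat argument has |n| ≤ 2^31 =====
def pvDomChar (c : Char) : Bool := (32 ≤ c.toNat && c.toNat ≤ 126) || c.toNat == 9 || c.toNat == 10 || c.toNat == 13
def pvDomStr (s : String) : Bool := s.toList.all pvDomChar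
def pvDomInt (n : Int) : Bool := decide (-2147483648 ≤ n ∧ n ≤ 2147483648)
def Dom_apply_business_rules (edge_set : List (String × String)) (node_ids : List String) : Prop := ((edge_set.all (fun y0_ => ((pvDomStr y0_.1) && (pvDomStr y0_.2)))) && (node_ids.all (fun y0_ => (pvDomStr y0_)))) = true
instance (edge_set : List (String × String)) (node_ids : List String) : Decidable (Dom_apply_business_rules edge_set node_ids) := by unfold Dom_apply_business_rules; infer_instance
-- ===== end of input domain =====

-- B replaces A's in-place discard/add mutation loops (and A's generate-all-south-pairs inner
-- double loop) by one scan of the edges building a removable set, returning a single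
-- set-algebra expression; objective: simpler.

-- ===== PORT A =====
def FORBIDDEN_DIRECT_EDGES : List (String × String) :=
  [("BCN", "MUR"), ("ACO", "BIO"), ("VAL", "ALM")]

def REQUIRED_EDGES : List (String × String) :=
  [("BCN", "VAL"), ("VAL", "MUR"), ("ACO", "GIJ"), ("GIJ", "BIO"), ("MAD", "SEV"), ("MAD", "MAL")]

def SOUTH_CHAIN : List String := ["CAC", "SEV", "MAL", "ALM", "MUR"]

-- Python's 'src < dst' on str is code-point lexicographic = '<' on .toList (PYSEM.md, str COMPARISON)
def normalize_edge (src dst : String) : String × String :=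
  if src.toList < dst.toList then (src, dst) else (dst, src)

def apply_business_rules (edge_set : List (String × String)) (node_ids : List String) : List (String × String) :=
  let nodes : PySem.Set String := PySem.Set.ofList node_ids
  let filtered : PySem.Set (String × String) := PySem.Set.ofList edge_set
  let filtered := FORBIDDEN_DIRECT_EDGES.foldl
      (fun f p => PySem.Set.discard f (normalize_edge p.1 p.2)) filtered
  let south_nodes := SOUTH_CHAIN.filter (fun n => PySem.Set.contains nodes n)
  -- indices produced by the ranges are always in bounds, so the pyGetD default "" is never used
  let allowed_south : PySem.Set (String × String) :=
    (PySem.List.pyRange 0 ((south_nodes.length : Int) - 1)).foldl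
      (fun s i => PySem.Set.add s
        (normalize_edge (PySem.List.pyGetD south_nodes i "") (PySem.List.pyGetD south_nodes (i + 1) "")))
      PySem.Set.empty
  let filtered := (PySem.List.pyRange 0 (south_nodes.length : Int)).foldl
      (fun f i => (PySem.List.pyRange (i + 1) (south_nodes.length : Int)).foldl
        (fun f j =>
          let pair := normalize_edge (PySem.List.pyGetD south_nodes i "") (PySem.List.pyGetD south_nodes j "")
          if PySem.Set.contains allowed_south pair then f else PySem.Set.discard f pair) f) filtered
  let filtered := REQUIRED_EDGES.foldl
      (fun f p => if PySem.Set.contains nodes p.1 && PySem.Set.contains nodes p.2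
        then PySem.Set.add f (normalize_edge p.1 p.2) else f) filtered
  allowed_south.foldl (fun f pair => PySem.Set.add f pair) filtered

-- ===== PORT B =====
def apply_business_rules_alt (edge_set : List (String × String)) (node_ids : List String) : List (String × String) :=
  let nodes : PySem.Set String := PySem.Set.ofList node_ids
  let south := SOUTH_CHAIN.filter (fun n => PySem.Set.contains nodes n)
  let south_present : PySem.Set String := PySem.Set.ofList south
  let consec : PySem.Set (String × String) :=
    (PySem.List.pyRange 0 ((south.length : Int) - 1)).foldl
      (fun s i => PySem.Set.add s
        (normalize_edge (PySem.List.pyGetD south i "") (PySem.List.pyGetD south (i + 1) "")))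
      PySem.Set.empty
  let removable : PySem.Set (String × String) := FORBIDDEN_DIRECT_EDGES.foldl
      (fun s p => PySem.Set.add s (normalize_edge p.1 p.2)) PySem.Set.empty
  let removable := PySem.Set.union removable
      (edge_set.foldl (fun s e =>
        if PySem.Set.contains south_present e.1 && PySem.Set.contains south_present e.2
            && decide (e.1.toList < e.2.toList) && !PySem.Set.contains consec e
        then PySem.Set.add s e else s) PySem.Set.empty)
  let required : PySem.Set (String × String) := REQUIRED_EDGES.foldl
      (fun s p => if PySem.Set.contains nodes p.1 && PySem.Set.contains nodes p.2
        then PySem.Set.add s (normalize_edge p.1 p.2) else s) PySem.Set.empty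
  PySem.Set.union (PySem.Set.union (PySem.Set.diff (PySem.Set.ofList edge_set) removable) required) consec

-- ===== PRECONDITION & SPEC =====
def Spec_apply_business_rules (edge_set : List (String × String)) (node_ids : List String) (out : List (String × String)) : Prop := out = apply_business_rules_alt edge_set node_ids
instance (edge_set : List (String × String)) (node_ids : List String) (out : List (String × String)) : Decidable (Spec_apply_business_rules edge_set node_ids out) := by unfold Spec_apply_business_rules; infer_instance

-- ===== CLAIM (what is proved, stated in full; the proofs are below) =====
def Claim_equal_apply_business_rules : Prop := ∀ (edge_set : List (String × String)) (node_ids : List String), Dom_apply_business_rules edge_set node_ids → Spec_apply_business_rules edge_set node_ids (apply_business_rules edge_set node_ids)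

-- ===== LEMMAS AND PROOFS =====

-- updating with a set built from the list M is the same as updating with M itself
theorem pv_update_ofList {α : Type} [BEq α] [LawfulBEq α] (X : PySem.Set α) (M : List α) :
    PySem.Set.update X (PySem.Set.ofList M) = PySem.Set.update X M := by
  induction M using List.reverseRecOn with
  | nil => rfl
  | append_singleton M x ih =>
    rw [PySem.Set.ofList_append_singleton]
    have hr : PySem.Set.update X (M ++ [x]) = (PySem.Set.update X M).add x := by
      show List.foldl PySem.Set.add X (M ++ [x]) = _
      rw [List.foldl_append]; rfl
    by_cases hx : x ∈ M
    · have h1 : (PySem.Set.ofList M).add x = PySem.Set.ofList M := by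
        simp [PySem.Set.add, hx]
      have h3 : (PySem.Set.update X M).add x = PySem.Set.update X M := by
        simp [PySem.Set.add, hx]
      rw [h1, ih, hr, h3]
    · have h1 : (PySem.Set.ofList M).add x = PySem.Set.ofList M ++ [x] := by
        simp [PySem.Set.add, hx]
      rw [h1, hr]
      show List.foldl PySem.Set.add X (PySem.Set.ofList M ++ [x]) = _
      rw [List.foldl_append]
      show (PySem.Set.update X (PySem.Set.ofList M)).add x = _
      rw [ih]

-- s | t, as a list, is the add-fold of t's elements into s
theorem pv_union_foldl {α : Type} [BEq α] (X : PySem.Set α) (t : List α) :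
    PySem.Set.union X t = t.foldl (fun f p => PySem.Set.add f p) X := rfl

-- a conditional add-fold from empty is the set of the filtered mapped list
theorem pv_union_condAdd {α β : Type} [BEq α] [LawfulBEq α] (X : PySem.Set α) (L : List β)
    (c : β → Bool) (g : β → α) :
    PySem.Set.union X (L.foldl (fun s p => if c p then PySem.Set.add s (g p) else s) PySem.Set.empty)
      = L.foldl (fun s p => if c p then PySem.Set.add s (g p) else s) X := by
  have key : ∀ Y : PySem.Set α,
      L.foldl (fun s p => if c p then PySem.Set.add s (g p) else s) Y
        = PySem.Set.update Y ((L.filter c).map g) := by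
    intro Y
    rw [PySem.List.foldl_if_eq_foldl_filter c (fun s p => PySem.Set.add s (g p))]
    rw [PySem.Set.update, List.foldl_map]
  rw [key, key, PySem.Set.union]
  have h : PySem.Set.update PySem.Set.empty ((L.filter c).map g)
      = PySem.Set.ofList ((L.filter c).map g) := rfl
  rw [h, pv_update_ofList]

-- a conditional-add fold from empty (a set comprehension with a guard) is ofList of the filtered list
theorem pv_condAdd_ofList {α : Type} [BEq α] (L : List α) (c : α → Bool) :
    L.foldl (fun s e => if c e then PySem.Set.add s e else s) PySem.Set.empty
      = PySem.Set.ofList (L.filter c) := by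
  rw [PySem.List.foldl_if_eq_foldl_filter]; rfl

-- an add-fold of g over L from empty (a set comprehension) is ofList of the mapped list
theorem pv_mapAdd_ofList {α β : Type} [BEq α] (L : List β) (g : β → α) :
    L.foldl (fun s p => PySem.Set.add s (g p)) PySem.Set.empty
      = PySem.Set.ofList (L.map g) := by
  show _ = List.foldl PySem.Set.add PySem.Set.empty (L.map g)
  rw [List.foldl_map]

-- a fold of conditional discards is a filter
theorem pv_condDiscard_filter {α : Type} [BEq α] [LawfulBEq α] (L : List α) (c : α → Bool)
    (X : PySem.Set α) :
    L.foldl (fun f p => if c p then f else PySem.Set.discard f p) X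
      = X.filter (fun e => !(L.contains e && !c e)) := by
  induction L generalizing X with
  | nil => simp
  | cons a L ih =>
    rw [List.foldl_cons, ih]
    by_cases ha : c a
    · rw [if_pos ha]
      apply List.filter_congr
      intro e _
      by_cases he : e = a
      · subst he; simp [ha]
      · simp [he]
    · rw [if_neg ha]
      show (List.filter _ (PySem.Set.discard X a)) = _
      rw [PySem.Set.discard, List.filter_filter]
      apply List.filter_congr
      intro e _
      by_cases he : e = a
      · subst he; simp [ha]
      · simp [he]

-- a fold of unconditional discards is a filter
theorem pv_discard_filter {α : Type} [BEq α] [LawfulBEq α] (L : List α) (X : PySem.Set α) :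
    L.foldl PySem.Set.discard X = X.filter (fun e => !L.contains e) := by
  have h := pv_condDiscard_filter L (fun _ => false) X
  simpa using h

-- the pairs visited by A's nested south loops are exactly the ordered pairs of distinct members of S
theorem pv_mem_pairs_iff (S : List String) (hS : S.Nodup) (e : String × String) :
    e ∈ (PySem.List.pyRange 0 (S.length : Int)).flatMap
        (fun i => (PySem.List.pyRange (i + 1) (S.length : Int)).map
          (fun j => normalize_edge (PySem.List.pyGetD S i "") (PySem.List.pyGetD S j "")))
      ↔ (e.1 ∈ S ∧ e.2 ∈ S ∧ e.1.toList < e.2.toList) := by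
  obtain ⟨a, b⟩ := e
  simp only [List.mem_flatMap, List.mem_map, PySem.List.mem_pyRange_one]
  constructor
  · rintro ⟨i, ⟨hi0, hin⟩, j, ⟨hij, hjn⟩, heq⟩
    obtain ⟨iN, rfl⟩ := Int.eq_ofNat_of_zero_le hi0
    obtain ⟨jN, rfl⟩ := Int.eq_ofNat_of_zero_le (by omega : (0:Int) ≤ j)
    have hiN : iN < S.length := by exact_mod_cast hin
    have hjN : jN < S.length := by exact_mod_cast hjn
    have hijN : iN < jN := by exact_mod_cast hij
    rw [PySem.List.pyGetD_natCast, PySem.List.pyGetD_natCast] at heq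
    rw [List.getD_eq_getElem S _ hiN, List.getD_eq_getElem S _ hjN] at heq
    have hne : S[iN] ≠ S[jN] := by
      intro h; exact absurd ((hS.getElem_inj_iff).1 h) (Nat.ne_of_lt hijN)
    have hneL : S[iN].toList ≠ S[jN].toList := fun h => hne (String.toList_inj.mp h)
    unfold normalize_edge at heq
    split_ifs at heq with hlt
    · obtain ⟨rfl, rfl⟩ := Prod.mk.inj heq
      exact ⟨List.getElem_mem _, List.getElem_mem _, hlt⟩
    · obtain ⟨rfl, rfl⟩ := Prod.mk.inj heq
      exact ⟨List.getElem_mem _, List.getElem_mem _,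
        lt_of_le_of_ne (not_lt.1 hlt) (Ne.symm hneL)⟩
  · rintro ⟨ha, hb, hlt⟩
    obtain ⟨i, hi, rfl⟩ := List.mem_iff_getElem.1 ha
    obtain ⟨j, hj, rfl⟩ := List.mem_iff_getElem.1 hb
    have hne : i ≠ j := by
      intro h; subst h; exact absurd rfl (ne_of_lt hlt)
    rcases Nat.lt_or_gt_of_ne hne with h | h
    · refine ⟨(i : Int), ⟨by positivity, by exact_mod_cast hi⟩, (j : Int),
        ⟨by exact_mod_cast h, by exact_mod_cast hj⟩, ?_⟩
      rw [PySem.List.pyGetD_natCast, PySem.List.pyGetD_natCast,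
        List.getD_eq_getElem S _ hi, List.getD_eq_getElem S _ hj]
      simp [normalize_edge, hlt]
    · refine ⟨(j : Int), ⟨by positivity, by exact_mod_cast hj⟩, (i : Int),
        ⟨by exact_mod_cast h, by exact_mod_cast hi⟩, ?_⟩
      rw [PySem.List.pyGetD_natCast, PySem.List.pyGetD_natCast,
        List.getD_eq_getElem S _ hj, List.getD_eq_getElem S _ hi]
      simp [normalize_edge, not_lt_of_gt hlt]

-- A's nested south double loop, as a single filter of the working set
theorem pv_nested_filter (S : List String) (hS : S.Nodup)
    (allowed : PySem.Set (String × String)) (X : PySem.Set (String × String)) :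
    (PySem.List.pyRange 0 (S.length : Int)).foldl
      (fun f i => (PySem.List.pyRange (i + 1) (S.length : Int)).foldl
        (fun f j =>
          if PySem.Set.contains allowed
              (normalize_edge (PySem.List.pyGetD S i "") (PySem.List.pyGetD S j "")) then f
          else PySem.Set.discard f
              (normalize_edge (PySem.List.pyGetD S i "") (PySem.List.pyGetD S j ""))) f) X
      = X.filter (fun e =>
          !(decide (e.1 ∈ S ∧ e.2 ∈ S ∧ e.1.toList < e.2.toList) && !PySem.Set.contains allowed e)) := by
  have h1 : (PySem.List.pyRange 0 (S.length : Int)).foldl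
      (fun f i => (PySem.List.pyRange (i + 1) (S.length : Int)).foldl
        (fun f j =>
          if PySem.Set.contains allowed
              (normalize_edge (PySem.List.pyGetD S i "") (PySem.List.pyGetD S j "")) then f
          else PySem.Set.discard f
              (normalize_edge (PySem.List.pyGetD S i "") (PySem.List.pyGetD S j ""))) f) X
      = (PySem.List.pyRange 0 (S.length : Int)).foldl
      (fun f i => ((PySem.List.pyRange (i + 1) (S.length : Int)).map
          (fun j => normalize_edge (PySem.List.pyGetD S i "") (PySem.List.pyGetD S j ""))).foldl
        (fun f p => if PySem.Set.contains allowed p then f else PySem.Set.discard f p) f) X := by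
    apply PySem.List.foldl_congr_mem
    intro acc i _
    exact (List.foldl_map
      (f := fun j => normalize_edge (PySem.List.pyGetD S i "") (PySem.List.pyGetD S j ""))
      (g := fun f p => if PySem.Set.contains allowed p then f else PySem.Set.discard f p)).symm
  rw [h1, ← List.foldl_flatMap, pv_condDiscard_filter]
  apply List.filter_congr
  intro e _
  have hc : ((PySem.List.pyRange 0 (S.length : Int)).flatMap
      (fun i => (PySem.List.pyRange (i + 1) (S.length : Int)).map
        (fun j => normalize_edge (PySem.List.pyGetD S i "") (PySem.List.pyGetD S j "")))).contains e
      = decide (e.1 ∈ S ∧ e.2 ∈ S ∧ e.1.toList < e.2.toList) := by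
    rw [Bool.eq_iff_iff]
    simp only [List.contains_iff_mem, decide_eq_true_eq]
    exact pv_mem_pairs_iff S hS e
  rw [hc]

-- ===== VERDICT (by name: the statement is the Claim_ definition above) =====
theorem apply_business_rules_spec : Claim_equal_apply_business_rules := by
  intro E N _
  unfold Spec_apply_business_rules apply_business_rules apply_business_rules_alt
  dsimp only
  rw [pv_union_foldl]
  rw [pv_union_condAdd]
  congr 1
  congr 1
  have hSnd : (List.filter (fun n => (PySem.Set.ofList N).contains n) SOUTH_CHAIN).Nodup :=
    List.Nodup.filter _ (by decide)
  set S : List String := List.filter (fun n => (PySem.Set.ofList N).contains n) SOUTH_CHAIN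
  set allowed : PySem.Set (String × String) :=
    (PySem.List.pyRange 0 ((S.length : Int) - 1)).foldl
      (fun s i => PySem.Set.add s
        (normalize_edge (PySem.List.pyGetD S i "") (PySem.List.pyGetD S (i + 1) "")))
      PySem.Set.empty
  rw [pv_nested_filter _ hSnd]
  have hforb : List.foldl (fun f p => PySem.Set.discard f (normalize_edge p.1 p.2))
      (PySem.Set.ofList E) FORBIDDEN_DIRECT_EDGES
      = (PySem.Set.ofList E).filter
        (fun e => !(FORBIDDEN_DIRECT_EDGES.map (fun p => normalize_edge p.1 p.2)).contains e) := by
    rw [← List.foldl_map (f := fun p : String × String => normalize_edge p.1 p.2)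
      (g := PySem.Set.discard), pv_discard_filter]
  rw [hforb, List.filter_filter,
    pv_mapAdd_ofList FORBIDDEN_DIRECT_EDGES (fun p => normalize_edge p.1 p.2),
    pv_condAdd_ofList]
  show _ = List.filter _ (PySem.Set.ofList E)
  apply List.filter_congr
  intro e he
  rw [Bool.eq_iff_iff]
  have hE : e ∈ E := (PySem.Set.mem_ofList E e).1 he
  simp [PySem.Set.mem_union, PySem.Set.mem_ofList, List.mem_filter, decide_eq_true_eq, hE]
  constructor
  · rintro ⟨h1, h2⟩
    refine ⟨h2, fun ha hb hlt => ?_⟩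
    rcases h1 with (h | h | h) | h
    · exact absurd ha h
    · exact absurd hb h
    · exact absurd hlt (not_lt.2 h)
    · exact h
  · rintro ⟨h2, h1⟩
    refine ⟨?_, h2⟩
    by_cases ha : e.1 ∈ S
    · by_cases hb : e.2 ∈ S
      · by_cases hlt : e.1.toList < e.2.toList
        · exact Or.inr (h1 ha hb hlt)
        · exact Or.inl (Or.inr (Or.inr (not_lt.1 hlt)))
      · exact Or.inl (Or.inr (Or.inl hb))
    · exact Or.inl (Or.inl ha)
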